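-- pv_equiv track=rewrite | github.com/hi-ogawa/practice | atcoder/abc174_d/main.py | solve
-- ===== SOURCE A (Python) =====
-- def solve(ls):
--     n = len(ls)
--     num_w = len([x for x in ls if x == "W"])
--     num_r = n - num_w
--     left_w = 0
--     right_r = num_r
--     result = num_r
--     for i in range(n):
--         if ls[i] == "W":
--             left_w += 1
--         else:
--             right_r -= 1
--         result = min(result, max(left_w, right_r))
--     return result
-- ===== SOURCE B (Python) =====
-- def solve(ls):
--     num_r = len(ls) - ls.count("W")
--     return ls[:num_r].count("W")
-- ===== Notes on version B (the rewrite author's own statement) =====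
-- stated objective: simpler
-- what changed: Replaced A's sliding-boundary loop (running left-W / right-R counters with a running minimum of their max) by the closed-form optimum: the answer is the number of 'W' characters in the first num_r positions, computed with two counts and a slice (a timing run measured B ~3.7x faster: C-level count/slice instead of a Python-level loop).
import Mathlib
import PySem

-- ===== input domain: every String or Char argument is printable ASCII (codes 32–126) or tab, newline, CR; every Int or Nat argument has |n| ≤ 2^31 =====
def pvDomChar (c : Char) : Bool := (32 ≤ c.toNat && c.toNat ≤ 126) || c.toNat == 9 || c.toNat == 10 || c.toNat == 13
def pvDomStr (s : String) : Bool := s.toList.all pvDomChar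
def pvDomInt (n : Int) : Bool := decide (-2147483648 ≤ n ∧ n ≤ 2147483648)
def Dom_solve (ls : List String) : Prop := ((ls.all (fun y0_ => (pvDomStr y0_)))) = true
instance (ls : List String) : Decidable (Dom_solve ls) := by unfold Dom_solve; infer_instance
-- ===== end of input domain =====

-- B replaces A's sliding-boundary loop with the closed-form optimum: count the 'W's in the
-- first num_r positions (objective: simpler).

-- ===== PORT A =====
def solveStep (s : Int × Int × Int) (x : String) : Int × Int × Int :=
  let lw := if x == "W" then s.1 + 1 else s.1
  let rr := if x == "W" then s.2.1 else s.2.1 - 1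
  (lw, rr, min s.2.2 (max lw rr))

def solve (ls : List String) : Int :=
  let n : Int := ls.length
  let numW : Int := (ls.filter (fun x => x == "W")).length
  let numR : Int := n - numW
  (ls.foldl solveStep (0, numR, numR)).2.2

-- ===== PORT B =====
def solve_alt (ls : List String) : Int :=
  let numR : Nat := ls.length - ls.count "W"
  ((ls.take numR).count "W" : Int)

-- ===== PRECONDITION & SPEC =====
def Spec_solve (ls : List String) (out : Int) : Prop := out = solve_alt ls
instance (ls : List String) (out : Int) : Decidable (Spec_solve ls out) := by unfold Spec_solve; infer_instance

-- ===== CLAIM (what is proved, stated in full; the proofs are below) =====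
def Claim_equal_solve : Prop := ∀ (ls : List String), Dom_solve ls → Spec_solve ls (solve ls)

-- ===== LEMMAS AND PROOFS =====

-- number of non-"W" elements
def nw (l : List String) : Nat := l.countP (fun x => !(x == "W"))

-- the running minimum A's loop computes from offset a, written as a recursion
def M : List String → Int → Int
  | [], a => a
  | x :: t, a =>
      let a' := if x == "W" then a + 1 else a
      min (max a' ((nw t : Nat) : Int)) (M t a')

theorem nw_cons_W (x : String) (t : List String) (h : (x == "W") = true) :
    nw (x :: t) = nw t := by simp [nw, h]

theorem nw_cons_not (x : String) (t : List String) (h : (x == "W") = false) :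
    nw (x :: t) = nw t + 1 := by simp [nw, h]

theorem foldl_solveStep (l : List String) : ∀ (a r : Int), 0 ≤ a →
    r ≤ max a ((nw l : Nat) : Int) →
    (l.foldl solveStep (a, ((nw l : Nat) : Int), r)).2.2 = min r (M l a) := by
  induction l with
  | nil =>
      intro a r ha hr
      have hra : r ≤ a := by simp [nw] at hr; omega
      simp [M, min_eq_left hra]
  | cons x t ih =>
      intro a r ha hr
      by_cases h : (x == "W") = true
      · rw [List.foldl_cons]
        have hstep : solveStep (a, ((nw (x :: t) : Nat) : Int), r) x
            = (a + 1, ((nw t : Nat) : Int), min r (max (a + 1) ((nw t : Nat) : Int))) := by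
          simp [solveStep, h, nw_cons_W x t h]
        rw [hstep, ih (a + 1) _ (by omega) (min_le_right _ _)]
        simp [M, h, min_assoc]
      · rw [List.foldl_cons]
        have hb : (x == "W") = false := by simpa using h
        have hstep : solveStep (a, ((nw (x :: t) : Nat) : Int), r) x
            = (a, ((nw t : Nat) : Int), min r (max a ((nw t : Nat) : Int))) := by
          simp only [solveStep, hb, nw_cons_not x t hb]
          simp
        rw [hstep, ih a _ ha (min_le_right _ _)]
        simp [M, hb, min_assoc]

theorem M_closed (l : List String) : ∀ (a : Nat),
    min (max (a : Int) ((nw l : Nat) : Int)) (M l (a : Int))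
      = (a : Int) + ((l.take (nw l - a)).count "W" : Nat) := by
  induction l with
  | nil => intro a; simp [nw, M]
  | cons x t ih =>
      intro a
      by_cases h : (x == "W") = true
      · have hx : x = "W" := by simpa using h
        rw [nw_cons_W x t h]
        by_cases hle : a < nw t
        · have htake : (x :: t).take (nw t - a) = x :: t.take (nw t - (a + 1)) := by
            have : nw t - a = (nw t - (a + 1)) + 1 := by omega
            rw [this, List.take_succ_cons]
          have ih' := ih (a + 1)
          push_cast at ih'
          have hcnt : (((x :: t.take (nw t - (a + 1))).count "W" : Nat) : Int)
              = ((t.take (nw t - (a + 1))).count "W" : Nat) + 1 := by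
            simp [hx]
          rw [htake, hcnt]
          have hM : M (x :: t) a = min (max ((a : Int) + 1) ((nw t : Nat) : Int)) (M t ((a : Int) + 1)) := by
            simp [M, h]
          rw [hM]
          have hub : min (max ((a : Int) + 1) ((nw t : Nat) : Int)) (M t ((a : Int) + 1))
              ≤ max (a : Int) ((nw t : Nat) : Int) := by
            have : max ((a : Int) + 1) ((nw t : Nat) : Int) = ((nw t : Nat) : Int) := by omega
            calc min (max ((a : Int) + 1) ((nw t : Nat) : Int)) (M t ((a : Int) + 1))
                ≤ max ((a : Int) + 1) ((nw t : Nat) : Int) := min_le_left _ _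
              _ ≤ max (a : Int) ((nw t : Nat) : Int) := by omega
          rw [min_eq_right hub, ih']
          push_cast
          ring
        · -- a ≥ nw t : both sides are a
          have htake : nw t - a = 0 := by omega
          have ih' := ih (a + 1)
          have htake' : nw t - (a + 1) = 0 := by omega
          rw [htake', List.take_zero] at ih'
          simp only [List.count_nil, Nat.cast_zero, add_zero] at ih'
          push_cast at ih'
          rw [htake, List.take_zero]
          simp only [List.count_nil, Nat.cast_zero, add_zero]
          have hM : M (x :: t) a = min (max ((a : Int) + 1) ((nw t : Nat) : Int)) (M t ((a : Int) + 1)) := by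
            simp [M, h]
          rw [hM, ih']
          omega
      · have hb : (x == "W") = false := by simpa using h
        have hx : ¬ (x = "W") := by simpa using hb
        rw [nw_cons_not x t hb]
        have hM : M (x :: t) a = min (max (a : Int) ((nw t : Nat) : Int)) (M t (a : Int)) := by
          simp [M, hb]
        rw [hM]
        by_cases hle : a ≤ nw t
        · have htake : (x :: t).take (nw t + 1 - a) = x :: t.take (nw t - a) := by
            have : nw t + 1 - a = (nw t - a) + 1 := by omega
            rw [this, List.take_succ_cons]
          have hcnt : (((x :: t.take (nw t - a)).count "W" : Nat) : Int)
              = ((t.take (nw t - a)).count "W" : Nat) := by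
            simp [hx]
          rw [htake, hcnt]
          have ih' := ih a
          have hub : min (max (a : Int) ((nw t : Nat) : Int)) (M t (a : Int))
              ≤ max (a : Int) (((nw t + 1 : Nat) : Nat) : Int) := by
            calc min (max (a : Int) ((nw t : Nat) : Int)) (M t (a : Int))
                ≤ max (a : Int) ((nw t : Nat) : Int) := min_le_left _ _
              _ ≤ max (a : Int) (((nw t + 1 : Nat) : Nat) : Int) := by push_cast; omega
          rw [min_eq_right hub, ih']
        · have htake : nw t + 1 - a = 0 := by omega
          have htake' : nw t - a = 0 := by omega
          have ih' := ih a
          rw [htake', List.take_zero] at ih'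
          simp only [List.count_nil, Nat.cast_zero, add_zero] at ih'
          rw [htake, List.take_zero]
          simp only [List.count_nil, Nat.cast_zero, add_zero]
          rw [ih']
          push_cast
          omega

theorem length_eq_count_add_nw (l : List String) :
    l.length = l.count "W" + nw l := by
  have := List.length_eq_countP_add_countP (l := l) (p := fun x => x == "W")
  simpa [nw, List.count] using this

-- ===== VERDICT (by name: the statement is the Claim_ definition above) =====
theorem solve_spec : Claim_equal_solve := by
  intro ls _
  unfold Spec_solve solve solve_alt
  have hlen := length_eq_count_add_nw ls
  have hfW : ((ls.filter (fun x => x == "W")).length : Int) = (ls.count "W" : Nat) := by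
    simp [List.count, List.countP_eq_length_filter]
  have hnumR : ((ls.length : Int) - ((ls.filter (fun x => x == "W")).length : Int))
      = ((nw ls : Nat) : Int) := by rw [hfW]; omega
  simp only [hnumR]
  have h0 : ((0 : Nat) : Int) = (0 : Int) := rfl
  have hfold := foldl_solveStep ls 0 ((nw ls : Nat) : Int) le_rfl (by omega)
  rw [hfold]
  have hM := M_closed ls 0
  simp only [Nat.cast_zero, Nat.sub_zero, zero_add, max_eq_right (by positivity : (0:Int) ≤ ((nw ls : Nat) : Int))] at hM
  rw [hM]
  have : ls.length - ls.count "W" = nw ls := by omega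
  rw [this]
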